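-- pv_equiv track=rewrite | github.com/yuiijie/milestone_6_bookkeeping | milestone_3/Milestone 3 triangle.py | get_triangle1
-- ===== SOURCE A (Python) =====
-- from math import factorial
--
-- def get_triangle1(rows: int):
--   triangle = []
--   row = []
--   last_row = []
--   for i in range(rows):
--     row = []
--     for j in range(i+1):
--       row.append((factorial(i)//(factorial(j)*factorial(i-j))))
--     triangle.append(row)
--     last_row = row
--
--   return triangle
-- ===== SOURCE B (Python) =====
-- def get_triangle1(rows: int):
--   triangle = []
--   row = [1]
--   for _ in range(rows):
--     triangle.append(row)
--     row = [1] + [a + b for a, b in zip(row, row[1:])] + [1]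
--   return triangle
-- ===== Notes on version B (the rewrite author's own statement) =====
-- stated objective: faster
-- what changed: Replaces the per-entry factorial formula with Pascal's additive rule, building each row from the previous one by pairwise sums.
import Mathlib
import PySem

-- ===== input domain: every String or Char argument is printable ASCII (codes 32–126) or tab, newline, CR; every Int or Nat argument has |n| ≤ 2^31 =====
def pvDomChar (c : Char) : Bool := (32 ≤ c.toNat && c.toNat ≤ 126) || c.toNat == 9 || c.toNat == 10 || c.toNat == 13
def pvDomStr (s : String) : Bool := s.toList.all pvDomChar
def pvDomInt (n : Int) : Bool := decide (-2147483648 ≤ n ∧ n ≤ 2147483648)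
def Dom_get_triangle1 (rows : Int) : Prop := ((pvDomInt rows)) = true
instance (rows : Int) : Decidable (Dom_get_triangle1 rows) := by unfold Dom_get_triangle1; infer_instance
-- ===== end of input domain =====

-- B replaces A's per-entry factorial formula by Pascal's additive rule (each row from
-- the previous by pairwise sums); objective: faster (asymptotically fewer big-int ops).

-- ===== PORT A =====
-- math.factorial; exact for n ≥ 0, the only arguments A passes it
def pyFactorial (n : Int) : Int := (Nat.factorial n.toNat : Int)

def get_triangle1 (rows : Int) : List (List Int) :=
  let triangle : List (List Int) := []
  -- for i in range(rows): row = []; for j in range(i+1): row.append(i!//(j!*(i-j)!)); triangle.append(row)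
  (PySem.List.pyRange 0 rows 1).foldl (fun triangle i =>
    let row := (PySem.List.pyRange 0 (i + 1) 1).foldl (fun row j =>
      row ++ [PySem.Int.floordiv (pyFactorial i) (pyFactorial j * pyFactorial (i - j))]) []
    triangle ++ [row]) triangle

-- ===== PORT B =====
def get_triangle1_alt (rows : Int) : List (List Int) :=
  -- row[1:] ported as .tail (exact for lists); the zip comprehension as zipWith
  ((PySem.List.pyRange 0 rows 1).foldl
    (fun (st : List (List Int) × List Int) _ =>
      (st.1 ++ [st.2], [1] ++ List.zipWith (· + ·) st.2 st.2.tail ++ [1]))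
    ([], [1])).1

-- ===== PRECONDITION & SPEC =====
def Spec_get_triangle1 (rows : Int) (out : List (List Int)) : Prop := out = get_triangle1_alt rows
instance (rows : Int) (out : List (List Int)) : Decidable (Spec_get_triangle1 rows out) := by unfold Spec_get_triangle1; infer_instance

-- ===== CLAIM (what is proved, stated in full; the proofs are below) =====
def Claim_equal_get_triangle1 : Prop := ∀ (rows : Int), Dom_get_triangle1 rows → Spec_get_triangle1 rows (get_triangle1 rows)

-- ===== LEMMAS AND PROOFS =====

/-- The reference row: binomial coefficients. -/
def crow (n : Nat) : List Int := (List.range (n + 1)).map (fun j => ((n.choose j : Nat) : Int))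

theorem foldl_append_map {α β : Type} (l : List α) (f : α → β) (acc : List β) :
    l.foldl (fun a x => a ++ [f x]) acc = acc ++ l.map f := by
  induction l generalizing acc with
  | nil => simp
  | cons x xs ih => simp [ih]

theorem pyFactorial_natCast (k : Nat) : pyFactorial (k : Int) = (Nat.factorial k : Int) := by
  simp [pyFactorial]

theorem a_row (k : Nat) :
    (PySem.List.pyRange 0 ((k : Int) + 1) 1).foldl (fun row j =>
      row ++ [PySem.Int.floordiv (pyFactorial (k : Int)) (pyFactorial j * pyFactorial ((k : Int) - j))]) []
    = crow k := by
  rw [PySem.List.pyRange_one]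
  have h1 : (((k : Int) + 1) - 0).toNat = k + 1 := by omega
  rw [h1, foldl_append_map, List.map_map]
  unfold crow
  apply List.map_congr_left
  intro j hj
  have hjk : j ≤ k := by simpa [Nat.lt_succ_iff] using List.mem_range.mp hj
  have e1 : pyFactorial (0 + (j : Int)) = (Nat.factorial j : Int) := by
    simpa using pyFactorial_natCast j
  have e2 : pyFactorial ((k : Int) - (0 + (j : Int))) = (Nat.factorial (k - j) : Int) := by
    have : ((k : Int) - (0 + (j : Int))) = ((k - j : Nat) : Int) := by omega
    rw [this]; exact pyFactorial_natCast (k - j)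
  simp only [Function.comp_apply, e1, e2, pyFactorial_natCast]
  have e3 : ((Nat.factorial j : Int)) * ((Nat.factorial (k - j) : Int))
      = ((Nat.factorial j * Nat.factorial (k - j) : Nat) : Int) := by push_cast; ring
  rw [e3, PySem.Int.floordiv_natCast]
  rw [Nat.choose_eq_factorial_div_factorial hjk]

theorem pascal_next (n : Nat) :
    [1] ++ List.zipWith (· + ·) (crow n) (crow n).tail ++ [1] = crow (n + 1) := by
  have hlen : (List.zipWith (· + ·) (crow n) (crow n).tail).length = n := by
    simp [crow]
  apply List.ext_getElem
  · simp [crow]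
  · intro k h1 h2
    have hk : k < n + 2 := by
      simp [crow] at h1; omega
    rcases Nat.eq_zero_or_pos k with hk0 | hkpos
    · subst hk0; simp [crow]
    · obtain ⟨j, rfl⟩ : ∃ j, k = j + 1 := ⟨k - 1, by omega⟩
      have hstep : ([(1 : Int)] ++ List.zipWith (· + ·) (crow n) (crow n).tail ++ [1])[j + 1]'h1
          = (List.zipWith (· + ·) (crow n) (crow n).tail ++ [1])[j]'(by simp [hlen]; omega) := by
        rfl
      rw [hstep]
      by_cases hje : j = n
      · subst hje
        rw [List.getElem_append_right (by omega)]
        simp [crow]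
      · have hjn : j < n := by omega
        rw [List.getElem_append_left (by omega)]
        rw [List.getElem_zipWith, List.getElem_tail]
        simp only [crow, List.getElem_map, List.getElem_range]
        have : (n + 1).choose (j + 1) = n.choose j + n.choose (j + 1) := Nat.choose_succ_succ n j
        rw [this]; push_cast; ring

theorem b_inv (n : Nat) :
    (List.range n).foldl
      (fun (st : List (List Int) × List Int) (_ : Nat) =>
        (st.1 ++ [st.2], [1] ++ List.zipWith (· + ·) st.2 st.2.tail ++ [1]))
      ([], [1])
    = ((List.range n).map crow, crow n) := by
  induction n with
  | zero => simp [crow]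
  | succ m ih =>
    rw [List.range_succ, List.foldl_append, ih]
    simp only [List.foldl_cons, List.foldl_nil]
    refine Prod.ext ?_ ?_
    · simp
    · simpa using pascal_next m

-- ===== VERDICT (by name: the statement is the Claim_ definition above) =====
theorem get_triangle1_spec : Claim_equal_get_triangle1 := by
  intro rows _
  unfold Spec_get_triangle1 get_triangle1 get_triangle1_alt
  rw [PySem.List.pyRange_one]
  simp only [Int.sub_zero]
  set n := rows.toNat with hn
  rw [List.foldl_map, List.foldl_map, foldl_append_map, b_inv]
  simp only [List.nil_append]
  apply List.map_congr_left
  intro k _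
  simpa using a_row k
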